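-- pv_equiv track=rewrite | github.com/ConnectFourPythonProjekt/Connect4 | agents/agents_montecarlo/monte_carlo.py | connected_three
-- ===== SOURCE A (Python) =====
-- def connected_three(position: int, mask: int) -> bool:
--     """
--     Return True, when the player has connected 3 and free space after/before them
--     Arguments:
--         position: bit representation of the board with players pieces
--         mask: bit representation of board with all pieces
--     Return:
--         bool: True for 3 connected
--     """
--     opp_pos = mask ^ position
--
--     # Diagonal /
--     m = position & (position >> 8)
--     if m & (m >> 8):
--         bits = "{0: 049b}".format(m & (m >> 8))
--         foo = [len(bits) - i - 1 for i in range(0, len(bits)) if bits[i] == '1']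
--         for j in range(len(foo)):
--             if ((opp_pos >> int(foo[j] + 24)) & 1) != 1 and foo[j] + 24 < 49:
--                 return True
--             elif foo[j] >= 8 and ((opp_pos >> int(foo[j] - 8)) & 1) != 1:
--                 return True
--
--     # Diagonal \
--     m = position & (position >> 6)
--     if m & (m >> 6):
--         bits = "{0: 049b}".format(m & (m >> 6))
--         foo = [len(bits) - i - 1 + 6 for i in range(0, len(bits)) if bits[i] == '1']
--         for j in range(len(foo)):
--             if ((opp_pos >> int(foo[j] + 12)) & 1) != 1 and foo[j] + 12 < 49:
--                 return True
--             elif foo[j] >= 12 and ((opp_pos >> int(foo[j] - 12)) & 1) != 1: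
--                 return True
--
--     # Horizontal
--     m = position & (position >> 7)
--     b = m & (m >> 7)
--     if b:
--         bits = "{0: 049b}".format(b)
--         foo = [len(bits) - i - 1 + 7 for i in range(0, len(bits)) if bits[i] == '1']
--         for j in range(len(foo)):
--             if ((opp_pos >> int(foo[j] + 14)) & 1) != 1 and foo[j] + 14 < 49:
--                 return True
--             elif foo[j] >= 14 and ((opp_pos >> int(foo[j] - 14)) & 1) != 1:
--                 return True
--
--     # Vertical
--     m = position & (position >> 1)
--     t = m & (m >> 1)
--     if t:
--         bits = "{0: 049b}".format(t)
--         foo = [len(bits) - i for i in range(0, len(bits)) if bits[i] == '1']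
--         for j in range(len(foo)):
--             if foo[j] >= 2 and ((opp_pos >> int(foo[j] - 2)) & 1) != 1:
--                 return True
--
--     # Nothing found
--     return False
-- ===== SOURCE B (Python) =====
-- def connected_three(position: int, mask: int) -> bool:
--     """
--     Return True, when the player has connected 3 and free space after/before them
--     (pure bitwise reformulation: no string formatting, no per-bit loops).
--     """
--     opp_pos = mask ^ position
--     full = (1 << 49) - 1          # the 49-bit board
--     empty = full ^ opp_pos        # board cells not held by the opponent
--     # directions: / (8), \ (6), horizontal (7): look after the triple and before it
--     for d in (8, 6, 7):
--         triple = position & (position >> d) & (position >> (2 * d))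
--         if (triple << (3 * d)) & full & empty:   # cell just after, on-board
--             return True
--         if (triple >> d) & empty:                # cell just before
--             return True
--     # vertical: the original only looks at the cell below the triple
--     triple = position & (position >> 1) & (position >> 2)
--     return bool((triple >> 1) & empty)
-- ===== Notes on version B (the rewrite author's own statement) =====
-- stated objective: idiomatic
-- what changed: Replaced A's '{0: 049b}' string formatting, per-direction set-bit index extraction and per-bit loops with pure bitwise tests: one shifted AND of each triple mask against the 49-bit board's opponent-free cells per direction.
-- outside the precondition, e.g. on connected_three(-1, 0): A returns False, B returns True; on connected_three(-263, 0): A returns True, B returns True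
import Mathlib
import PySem

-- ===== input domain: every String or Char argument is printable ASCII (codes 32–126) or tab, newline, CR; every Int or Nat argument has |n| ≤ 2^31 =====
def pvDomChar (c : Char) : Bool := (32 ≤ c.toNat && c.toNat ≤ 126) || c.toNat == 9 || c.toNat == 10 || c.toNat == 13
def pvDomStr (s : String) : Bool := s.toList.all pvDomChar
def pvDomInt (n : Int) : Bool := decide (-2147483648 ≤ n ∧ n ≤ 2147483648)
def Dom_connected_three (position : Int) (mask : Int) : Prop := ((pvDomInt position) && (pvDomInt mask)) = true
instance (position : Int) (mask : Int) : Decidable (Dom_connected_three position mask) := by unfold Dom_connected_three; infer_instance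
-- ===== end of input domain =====

-- B replaces A's "{0: 049b}" string formatting and per-set-bit index loops by pure
-- bitwise tests against the 49-bit board (objective: idiomatic bitboard code).

-- ===== PORT A =====

-- helper for A: binary digits of n by repeated division (big-endian), as Python's 'b' format produces
def pyBinDigits (n : Nat) : List Char :=
  if h : n = 0 then [] else pyBinDigits (n / 2) ++ [if n % 2 = 1 then '1' else '0']
decreasing_by exact Nat.div_lt_self (Nat.pos_of_ne_zero h) one_lt_two

-- "{0: 049b}".format(x): a sign space, then the binary digits zero-padded to width 49.
-- Exact for 0 ≤ x (all inputs admitted by Pre_connected_three); negative x never reaches it there.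
def pyFormatSp049b (x : Int) : List Char :=
  let ds := if x = 0 then ['0'] else pyBinDigits x.toNat
  ' ' :: (List.replicate (48 - ds.length) '0' ++ ds)

-- literal transliteration of A; `bits[i]` is indexed with `getD` since i ∈ range(len(bits))
-- is always in range; Python `x >> y`/`&`/`^` on ints are >>> / Int.land / Int.xor.
def connected_three (position : Int) (mask : Int) : Bool :=
  let opp_pos := Int.xor mask position
  -- Diagonal /
  let m := Int.land position (position >>> (8:Int))
  let d1 : Bool :=
    if Int.land m (m >>> (8:Int)) ≠ 0 then
      let bits := pyFormatSp049b (Int.land m (m >>> (8:Int)))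
      let foo : List Int := (List.range bits.length).filterMap fun i =>
        if bits.getD i ' ' = '1' then some ((bits.length : Int) - i - 1) else none
      foo.any fun f =>
        (decide (Int.land (opp_pos >>> (f + 24)) 1 ≠ 1) && decide (f + 24 < 49))
        || (decide (f ≥ 8) && decide (Int.land (opp_pos >>> (f - 8)) 1 ≠ 1))
    else false
  if d1 then true else
  -- Diagonal \
  let m2 := Int.land position (position >>> (6:Int))
  let d2 : Bool :=
    if Int.land m2 (m2 >>> (6:Int)) ≠ 0 then
      let bits := pyFormatSp049b (Int.land m2 (m2 >>> (6:Int)))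
      let foo : List Int := (List.range bits.length).filterMap fun i =>
        if bits.getD i ' ' = '1' then some ((bits.length : Int) - i - 1 + 6) else none
      foo.any fun f =>
        (decide (Int.land (opp_pos >>> (f + 12)) 1 ≠ 1) && decide (f + 12 < 49))
        || (decide (f ≥ 12) && decide (Int.land (opp_pos >>> (f - 12)) 1 ≠ 1))
    else false
  if d2 then true else
  -- Horizontal
  let m3 := Int.land position (position >>> (7:Int))
  let b := Int.land m3 (m3 >>> (7:Int))
  let d3 : Bool :=
    if b ≠ 0 then
      let bits := pyFormatSp049b b
      let foo : List Int := (List.range bits.length).filterMap fun i =>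
        if bits.getD i ' ' = '1' then some ((bits.length : Int) - i - 1 + 7) else none
      foo.any fun f =>
        (decide (Int.land (opp_pos >>> (f + 14)) 1 ≠ 1) && decide (f + 14 < 49))
        || (decide (f ≥ 14) && decide (Int.land (opp_pos >>> (f - 14)) 1 ≠ 1))
    else false
  if d3 then true else
  -- Vertical
  let m4 := Int.land position (position >>> (1:Int))
  let t := Int.land m4 (m4 >>> (1:Int))
  let d4 : Bool :=
    if t ≠ 0 then
      let bits := pyFormatSp049b t
      let foo : List Int := (List.range bits.length).filterMap fun i =>
        if bits.getD i ' ' = '1' then some ((bits.length : Int) - i) else none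
      foo.any fun f =>
        decide (f ≥ 2) && decide (Int.land (opp_pos >>> (f - 2)) 1 ≠ 1)
    else false
  d4

-- ===== PORT B =====

-- transliteration of Source B; the early-returning `for d in (8, 6, 7)` loop is `List.any`
def connected_three_alt (position : Int) (mask : Int) : Bool :=
  let opp_pos := Int.xor mask position
  let full : Int := (1 <<< (49:Int)) - 1
  let empty := Int.xor full opp_pos
  (([(8:Int), 6, 7].any fun d =>
      let triple := Int.land (Int.land position (position >>> d)) (position >>> (2*d))
      decide (Int.land (Int.land (triple <<< (3*d)) full) empty ≠ 0)
      || decide (Int.land (triple >>> d) empty ≠ 0))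
   || (let triple := Int.land (Int.land position (position >>> (1:Int))) (position >>> (2:Int))
       decide (Int.land (triple >>> (1:Int)) empty ≠ 0)))

-- ===== PRECONDITION & SPEC =====

-- Pre_ excludes only negative `position` (any `mask` is admitted). On negative position A
-- still returns, but its "{0: 049b}" formatting walks the bits of the ABSOLUTE VALUE of the
-- triple masks (sign-space formatting), an accident of Python's format spec that no bitboard
-- caller can hit; B reads the two's-complement bits there instead.
def Pre_connected_three (position : Int) (mask : Int) : Prop := 0 ≤ position
instance (position : Int) (mask : Int) : Decidable (Pre_connected_three position mask) := by
  unfold Pre_connected_three; infer_instance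

def pvWitness_connected_three : Int × Int := (15, 15)

def Spec_connected_three (position : Int) (mask : Int) (out : Bool) : Prop := out = connected_three_alt position mask
instance (position : Int) (mask : Int) (out : Bool) : Decidable (Spec_connected_three position mask out) := by unfold Spec_connected_three; infer_instance

-- ===== CLAIM (what is proved, stated in full; the proofs are below) =====
def Claim_equal_connected_three : Prop := ∀ (position : Int) (mask : Int), Dom_connected_three position mask → Pre_connected_three position mask → Spec_connected_three position mask (connected_three position mask)

-- ===== LEMMAS AND PROOFS =====

lemma pyBinDigits_getD (n : Nat) : ∀ k, (pyBinDigits n).reverse.getD k '0' = if n.testBit k then '1' else '0' := by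
  fun_induction pyBinDigits n with
  | case1 => intro k; simp
  | case2 n h ih =>
    intro k
    rw [List.reverse_append]
    cases k with
    | zero =>
      simp only [List.reverse_cons, List.reverse_nil, List.nil_append, List.cons_append,
        List.getD_cons_zero, Nat.testBit_zero]
      rcases Nat.mod_two_eq_zero_or_one n with h2 | h2 <;> simp [h2]
    | succ k =>
      simp only [List.reverse_cons, List.reverse_nil, List.nil_append, List.cons_append,
        List.getD_cons_succ]
      rw [ih k, Nat.testBit_add_one]

lemma pyBinDigits_lt (n : Nat) : n < 2 ^ (pyBinDigits n).length := by
  fun_induction pyBinDigits n with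
  | case1 => simp
  | case2 n h ih =>
    simp only [List.length_append, List.length_cons, List.length_nil]
    have := Nat.div_add_mod n 2
    have h2 := Nat.mod_lt n (y := 2) (by omega)
    rw [pow_succ]
    omega

lemma pyBinDigits_len_le (n : Nat) : ∀ L, n < 2 ^ L → (pyBinDigits n).length ≤ L := by
  fun_induction pyBinDigits n with
  | case1 => intro L _; simp
  | case2 n h ih =>
    intro L hL
    have hL1 : 1 ≤ L := by
      by_contra hc
      have : L = 0 := by omega
      subst this; simp at hL; omega
    have hdiv : n / 2 < 2 ^ (L - 1) := by
      have : 2 ^ L = 2 * 2 ^ (L-1) := by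
        conv_lhs => rw [show L = 1 + (L-1) by omega]
        rw [pow_add]; ring
      omega
    have := ih _ hdiv
    simp only [List.length_append, List.length_cons, List.length_nil]
    omega

lemma getD_zeros (l : List Char) (hl : ∀ c ∈ l, c = '0') (k : Nat) : l.getD k '0' = '0' := by
  rcases hlk : l[k]? with _ | c
  · simp [List.getD, hlk]
  · simp [List.getD, hlk, hl c (List.mem_of_getElem? hlk)]

-- the padded digit block, read in reverse, spells out the testBits of t
lemma pad_getD (t : Nat) (k : Nat) :
    (List.replicate (48 - (if (t:Int) = 0 then ['0'] else pyBinDigits ((t:Int)).toNat).length) '0'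
      ++ (if (t:Int) = 0 then ['0'] else pyBinDigits ((t:Int)).toNat)).reverse.getD k '0'
      = if t.testBit k then '1' else '0' := by
  by_cases h0 : t = 0
  · subst h0
    have hz : ((0:Nat):Int) = 0 := by norm_num
    rw [hz, if_pos rfl, Nat.zero_testBit, if_neg (by simp)]
    apply getD_zeros
    intro c hc
    rw [List.mem_reverse, List.mem_append] at hc
    rcases hc with hc | hc
    · exact List.eq_of_mem_replicate hc
    · simpa using hc
  · have h1 : ¬((t:Int) = 0) := by simpa using h0
    simp only [if_neg h1, Int.toNat_natCast]
    rw [List.reverse_append, List.reverse_replicate]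
    by_cases hk : k < (pyBinDigits t).length
    · rw [List.getD_append _ _ _ _ (by simpa using hk)]
      exact pyBinDigits_getD t k
    · have hk' : (pyBinDigits t).length ≤ k := by omega
      have hbit : t.testBit k = false :=
        Nat.testBit_lt_two_pow (lt_of_lt_of_le (pyBinDigits_lt t) (Nat.pow_le_pow_right (by norm_num) hk'))
      rw [hbit, if_neg (by simp)]
      rw [List.getD_append_right _ _ _ _ (by simpa using hk')]
      exact getD_zeros _ (fun c hc => List.eq_of_mem_replicate hc) _

lemma fmt_length (t : Nat) (ht : t < 2 ^ 48) : (pyFormatSp049b (t : Int)).length = 49 := by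
  unfold pyFormatSp049b
  by_cases h0 : t = 0
  · simp [h0]
  · have h1 : ¬((t:Int) = 0) := by simpa using h0
    have hle := pyBinDigits_len_le t 48 ht
    simp only [if_neg h1, Int.toNat_natCast, List.length_cons, List.length_append,
      List.length_replicate]
    omega

lemma fmt_getD (t : Nat) (ht : t < 2 ^ 48) (i : Nat) (hi : i < 49) :
    ((pyFormatSp049b (t : Int)).getD i ' ' = '1') ↔ (1 ≤ i ∧ t.testBit (48 - i) = true) := by
  have hP : ((if (t:Int) = 0 then ['0'] else pyBinDigits ((t:Int)).toNat)).length ≤ 48 := by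
    by_cases h0 : t = 0
    · simp [h0]
    · have h1 : ¬((t:Int) = 0) := by simpa using h0
      rw [if_neg h1, Int.toNat_natCast]
      exact pyBinDigits_len_le t 48 ht
  unfold pyFormatSp049b
  cases i with
  | zero => simp
  | succ j =>
    simp only [List.getD_cons_succ]
    set ds := (if (t:Int) = 0 then ['0'] else pyBinDigits ((t:Int)).toNat) with hds
    set P := List.replicate (48 - ds.length) '0' ++ ds with hPdef
    have hlen : P.length = 48 := by
      simp only [hPdef, List.length_append, List.length_replicate]
      omega
    have hj : j < 48 := by omega
    have hrange : j < P.length := by omega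
    have e3 : P.length - 1 - (47 - j) = j := by omega
    have erev : P.reverse.getD (47 - j) '0' = P.getD j '0' := by
      rw [List.getD_eq_getElem?_getD, List.getD_eq_getElem?_getD,
        List.getElem?_reverse (by omega : 47 - j < P.length), e3]
    have edef : P.getD j ' ' = P.getD j '0' := by
      rw [List.getD_eq_getElem _ _ hrange, List.getD_eq_getElem _ _ hrange]
    have e5 : P.getD j ' ' = (if t.testBit (47 - j) then '1' else '0') := by
      rw [edef, ← erev, hPdef, hds]
      exact pad_getD t (47 - j)
    rw [e5]
    have : 48 - (j+1) = 47 - j := by omega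
    rw [this]
    by_cases hb : t.testBit (47 - j) <;> simp [hb]

-- "has a set bit k with a free cell s positions above it (on-board)" / "… d positions below it"
def AfterP (t : Nat) (P : Nat → Prop) (s : Nat) : Prop := ∃ k, t.testBit k = true ∧ k + s < 49 ∧ P (k + s)
def BeforeP (t : Nat) (P : Nat → Prop) (d : Nat) : Prop := ∃ k, d ≤ k ∧ t.testBit k = true ∧ P (k - d)

-- the Python comprehension `foo` visits exactly the set bits of t
lemma foo_any (t : Nat) (ht : t < 2 ^ 48) (v : Nat → Int) (q : Int → Bool) :
    (((List.range (pyFormatSp049b (t:Int)).length).filterMap fun i =>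
        if (pyFormatSp049b (t:Int)).getD i ' ' = '1' then some (v i) else none).any q) = true
    ↔ ∃ k, k < 48 ∧ t.testBit k = true ∧ q (v (48 - k)) = true := by
  rw [List.any_eq_true]
  constructor
  · rintro ⟨f, hf, hq⟩
    rw [List.mem_filterMap] at hf
    obtain ⟨i, hi, hfi⟩ := hf
    rw [List.mem_range, fmt_length t ht] at hi
    by_cases hc : (pyFormatSp049b (t:Int)).getD i ' ' = '1'
    · rw [if_pos hc, Option.some_inj] at hfi
      obtain ⟨hi1, hbit⟩ := (fmt_getD t ht i hi).1 hc
      refine ⟨48 - i, by omega, hbit, ?_⟩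
      rw [show 48 - (48 - i) = i by omega, hfi]
      exact hq
    · rw [if_neg hc] at hfi; exact absurd hfi (by simp)
  · rintro ⟨k, hk, hbit, hq⟩
    refine ⟨v (48 - k), ?_, hq⟩
    rw [List.mem_filterMap]
    refine ⟨48 - k, by rw [List.mem_range, fmt_length t ht]; omega, ?_⟩
    rw [if_pos ((fmt_getD t ht (48-k) (by omega)).2 ⟨by omega, by rw [show 48-(48-k)=k by omega]; exact hbit⟩)]

lemma ne_zero_iff_testBit (x : Nat) : x ≠ 0 ↔ ∃ j, x.testBit j = true := by
  constructor
  · exact Nat.exists_testBit_of_ne_zero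
  · rintro ⟨j, hj⟩ h0
    rw [h0, Nat.zero_testBit] at hj
    exact absurd hj (by simp)

lemma testBit_lt_48 (t k : Nat) (ht : t < 2 ^ 48) (h : t.testBit k = true) : k < 48 := by
  have h2 := Nat.ge_two_pow_of_testBit h
  by_contra hc
  have : 2 ^ 48 ≤ 2 ^ k := Nat.pow_le_pow_right (by norm_num) (by omega)
  omega

lemma land1_ne (o j : Nat) : (((o >>> j) &&& 1 : Nat) ≠ 1) ↔ o.testBit j = false := by
  rw [Nat.and_one_is_mod, Nat.shiftRight_eq_div_pow, Nat.testBit_eq_decide_div_mod_eq]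
  rcases Nat.mod_two_eq_zero_or_one (o / 2 ^ j) with h | h <;> simp [h]

-- Int-cast bridges
lemma cast_land (a b : Nat) : Int.land (a:Int) (b:Int) = ((a &&& b : Nat) : Int) := by simp [Int.land]
lemma cast_xor (a b : Nat) : Int.xor (a:Int) (b:Int) = ((a ^^^ b : Nat) : Int) := by simp [Int.xor]
lemma cast_land1 (a : Nat) : Int.land (a:Int) 1 = ((a &&& 1 : Nat) : Int) := by
  simpa using cast_land a 1

lemma sr1 (a : Nat) : (a:Int) >>> (1:Int) = ((a >>> 1 : Nat) : Int) := by
  rw [show ((1:Int)) = ((1:Nat):Int) by norm_num]; exact Int.shiftRight_natCast a 1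
lemma sr2 (a : Nat) : (a:Int) >>> (2:Int) = ((a >>> 2 : Nat) : Int) := by
  rw [show ((2:Int)) = ((2:Nat):Int) by norm_num]; exact Int.shiftRight_natCast a 2
lemma sr6 (a : Nat) : (a:Int) >>> (6:Int) = ((a >>> 6 : Nat) : Int) := by
  rw [show ((6:Int)) = ((6:Nat):Int) by norm_num]; exact Int.shiftRight_natCast a 6
lemma sr7 (a : Nat) : (a:Int) >>> (7:Int) = ((a >>> 7 : Nat) : Int) := by
  rw [show ((7:Int)) = ((7:Nat):Int) by norm_num]; exact Int.shiftRight_natCast a 7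
lemma sr8 (a : Nat) : (a:Int) >>> (8:Int) = ((a >>> 8 : Nat) : Int) := by
  rw [show ((8:Int)) = ((8:Nat):Int) by norm_num]; exact Int.shiftRight_natCast a 8
lemma sr12 (a : Nat) : (a:Int) >>> (12:Int) = ((a >>> 12 : Nat) : Int) := by
  rw [show ((12:Int)) = ((12:Nat):Int) by norm_num]; exact Int.shiftRight_natCast a 12
lemma sr14 (a : Nat) : (a:Int) >>> (14:Int) = ((a >>> 14 : Nat) : Int) := by
  rw [show ((14:Int)) = ((14:Nat):Int) by norm_num]; exact Int.shiftRight_natCast a 14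
lemma sr16 (a : Nat) : (a:Int) >>> (16:Int) = ((a >>> 16 : Nat) : Int) := by
  rw [show ((16:Int)) = ((16:Nat):Int) by norm_num]; exact Int.shiftRight_natCast a 16
lemma sl18 (a : Nat) : (a:Int) <<< (18:Int) = ((a <<< 18 : Nat) : Int) := by
  rw [show ((18:Int)) = ((18:Nat):Int) by norm_num]; exact Int.shiftLeft_natCast a 18
lemma sl21 (a : Nat) : (a:Int) <<< (21:Int) = ((a <<< 21 : Nat) : Int) := by
  rw [show ((21:Int)) = ((21:Nat):Int) by norm_num]; exact Int.shiftLeft_natCast a 21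
lemma sl24 (a : Nat) : (a:Int) <<< (24:Int) = ((a <<< 24 : Nat) : Int) := by
  rw [show ((24:Int)) = ((24:Nat):Int) by norm_num]; exact Int.shiftLeft_natCast a 24

lemma full_eq : ((1:Int) <<< (49:Int)) - 1 = (((2:Nat) ^ 49 - 1 : Nat) : Int) := by
  rw [show ((1:Int)) = ((1:Nat):Int) by norm_num, show ((49:Int)) = ((49:Nat):Int) by norm_num,
    Int.shiftLeft_natCast, Nat.shiftLeft_eq, Nat.cast_sub (Nat.one_le_two_pow)]

lemma intBitTest (o jn : Nat) (j : Int) (hj : j = (jn : Int)) :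
    (Int.land ((o:Int) >>> j) 1 ≠ 1) ↔ o.testBit jn = false := by
  rw [hj, Int.shiftRight_natCast, cast_land1, ← land1_ne o jn]
  constructor
  · intro h heq; exact h (by exact_mod_cast heq)
  · intro h hc; exact h (by exact_mod_cast hc)

-- B-side: "free cell after the triple" bitmask test
lemma after_iff (t o s : Nat) : (((t <<< s) &&& (2^49-1)) &&& ((2^49-1) ^^^ o) ≠ 0) ↔ AfterP t (fun j => o.testBit j = false) s := by
  have hbit : ∀ j, (((t <<< s) &&& (2^49-1)) &&& ((2^49-1) ^^^ o)).testBit j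
      = (decide (s ≤ j) && t.testBit (j - s) && decide (j < 49) && !(o.testBit j)) := by
    intro j
    simp only [Nat.testBit_land, Nat.testBit_shiftLeft, Nat.testBit_two_pow_sub_one, Nat.testBit_xor]
    by_cases hj : j < 49 <;> cases hb : o.testBit j <;> simp [hj, hb, ge_iff_le]
  rw [ne_zero_iff_testBit]
  simp only [hbit, Bool.and_eq_true, decide_eq_true_eq, Bool.not_eq_eq_eq_not, Bool.not_true]
  constructor
  · rintro ⟨j, ⟨⟨h3, hT⟩, h49⟩, hO⟩
    exact ⟨j - s, hT, by omega, by rwa [show j - s + s = j by omega]⟩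
  · rintro ⟨k, hT, hlt, hO⟩
    exact ⟨k + s, ⟨⟨by omega, by simpa [show k + s - s = k by omega] using hT⟩, by omega⟩, hO⟩

-- B-side: "free cell before the triple" bitmask test
lemma before_iff (t o d : Nat) (ht : t < 2 ^ 48) (ho : o < 2 ^ 49) :
    (((t >>> d) &&& ((2^49-1) ^^^ o)) ≠ 0) ↔ BeforeP t (fun j => o.testBit j = false) d := by
  have hbit : ∀ j, ((t >>> d) &&& ((2^49-1) ^^^ o)).testBit j
      = (t.testBit (d + j) && decide (j < 49) && !(o.testBit j)) := by
    intro j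
    simp only [Nat.testBit_land, Nat.testBit_shiftRight, Nat.testBit_two_pow_sub_one, Nat.testBit_xor]
    by_cases hj : j < 49
    · cases hb : o.testBit j <;> simp [hj, hb]
    · have : o.testBit j = false :=
        Nat.testBit_lt_two_pow (lt_of_lt_of_le ho (Nat.pow_le_pow_right (by norm_num) (by omega)))
      simp [hj, this]
  rw [ne_zero_iff_testBit]
  simp only [hbit, Bool.and_eq_true, decide_eq_true_eq, Bool.not_eq_eq_eq_not, Bool.not_true]
  constructor
  · rintro ⟨j, ⟨hT, h49⟩, hO⟩
    exact ⟨d + j, by omega, hT, by rwa [show d + j - d = j by omega]⟩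
  · rintro ⟨k, hd, hT, hO⟩
    refine ⟨k - d, ⟨by rwa [show d + (k - d) = k by omega], ?_⟩, hO⟩
    have := testBit_lt_48 t k ht hT
    omega

lemma cast_xor_negL (a b : Nat) : Int.xor (Int.negSucc a) ((b:Nat):Int) = Int.negSucc (a ^^^ b) := rfl
lemma cast_xor_negR (a b : Nat) : Int.xor ((a:Nat):Int) (Int.negSucc b) = Int.negSucc (a ^^^ b) := rfl
lemma cast_land_negSucc (a b : Nat) : Int.land ((a:Nat):Int) (Int.negSucc b) = ((Nat.ldiff a b : Nat):Int) := rfl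

-- A's per-bit "opponent-free" probe, negative (two's-complement) opponent word
lemma intBitTestNeg (N jn : Nat) (j : Int) (hj : j = (jn : Int)) :
    (Int.land ((Int.negSucc N) >>> j) 1 ≠ 1) ↔ N.testBit jn = true := by
  rw [hj, Int.shiftRight_negSucc]
  have h1 : Int.land (Int.negSucc (N >>> jn)) 1 = ((Nat.ldiff 1 (N >>> jn) : Nat) : Int) := rfl
  have hb0 : (Nat.ldiff 1 (N >>> jn)).testBit 0 = !((N >>> jn).testBit 0) := by
    rw [Nat.testBit_ldiff]
    simp
  have hlt : Nat.ldiff 1 (N >>> jn) < 2 := by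
    have h2 := Nat.lt_pow_two_of_testBit (x := Nat.ldiff 1 (N >>> jn)) (n := 1) ?_
    · simpa using h2
    · intro i hi
      rcases i with _ | i
      · omega
      · rw [Nat.testBit_ldiff]
        simp [Nat.testBit_add_one]
  have hx : (N >>> jn).testBit 0 = N.testBit jn := by simp [Nat.testBit_shiftRight]
  rw [h1]
  constructor
  · intro hne
    by_contra hc
    have hbt : (Nat.ldiff 1 (N >>> jn)).testBit 0 = true := by
      rw [hb0, hx]
      simp [Bool.not_eq_true] at hc ⊢
      exact hc
    have hge := Nat.ge_two_pow_of_testBit hbt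
    have : Nat.ldiff 1 (N >>> jn) = 1 := by simpa using Nat.le_antisymm (by omega) (by simpa using hge)
    exact hne (by rw [this]; norm_num)
  · intro hbit hc
    have hL1 : Nat.ldiff 1 (N >>> jn) = 1 := by exact_mod_cast hc
    have hbt : (Nat.ldiff 1 (N >>> jn)).testBit 0 = true := by rw [hL1]; decide
    rw [hb0, hx, hbit] at hbt
    simp at hbt

-- B-side bitmask tests against a negative (two's-complement) opponent word
lemma after_iff_neg (t N s : Nat) :
    ((Nat.ldiff ((t <<< s) &&& (2^49-1)) ((2^49-1) ^^^ N)) ≠ 0)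
      ↔ AfterP t (fun j => N.testBit j = true) s := by
  have hbit : ∀ j, ((Nat.ldiff ((t <<< s) &&& (2^49-1)) ((2^49-1) ^^^ N))).testBit j
      = (decide (s ≤ j) && t.testBit (j - s) && decide (j < 49) && N.testBit j) := by
    intro j
    simp only [Nat.testBit_ldiff, Nat.testBit_land, Nat.testBit_shiftLeft,
      Nat.testBit_two_pow_sub_one, Nat.testBit_xor]
    by_cases hj : j < 49 <;> cases hb : N.testBit j <;> simp [hj, hb, ge_iff_le]
  rw [ne_zero_iff_testBit]
  simp only [hbit, Bool.and_eq_true, decide_eq_true_eq]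
  constructor
  · rintro ⟨j, ⟨⟨h3, hT⟩, h49⟩, hO⟩
    exact ⟨j - s, hT, by omega, by rwa [show j - s + s = j by omega]⟩
  · rintro ⟨k, hT, hlt, hO⟩
    exact ⟨k + s, ⟨⟨by omega, by simpa [show k + s - s = k by omega] using hT⟩, by omega⟩, hO⟩

lemma before_iff_neg (t N d : Nat) (ht : t < 2 ^ 48) :
    ((Nat.ldiff (t >>> d) ((2^49-1) ^^^ N)) ≠ 0)
      ↔ BeforeP t (fun j => N.testBit j = true) d := by
  have hbit : ∀ j, ((Nat.ldiff (t >>> d) ((2^49-1) ^^^ N))).testBit j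
      = (t.testBit (d + j) && decide (j < 49) && N.testBit j) := by
    intro j
    simp only [Nat.testBit_ldiff, Nat.testBit_shiftRight, Nat.testBit_two_pow_sub_one,
      Nat.testBit_xor]
    by_cases hj : j < 49
    · cases hb : N.testBit j <;> simp [hj, hb]
    · have htb : t.testBit (d + j) = false :=
        Nat.testBit_lt_two_pow (lt_of_lt_of_le ht (Nat.pow_le_pow_right (by norm_num) (by omega)))
      simp [hj, htb]
  rw [ne_zero_iff_testBit]
  simp only [hbit, Bool.and_eq_true, decide_eq_true_eq]
  constructor
  · rintro ⟨j, ⟨hT, h49⟩, hO⟩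
    exact ⟨d + j, by omega, hT, by rwa [show d + j - d = j by omega]⟩
  · rintro ⟨k, hd, hT, hO⟩
    refine ⟨k - d, ⟨by rwa [show d + (k - d) = k by omega], ?_⟩, hO⟩
    have := testBit_lt_48 t k ht hT
    omega

-- the two ways of writing the triple mask agree
lemma tri_eq (p d e : Nat) (he : e = 2 * d) :
    (p &&& (p >>> d)) &&& ((p &&& (p >>> d)) >>> d) = (p &&& (p >>> d)) &&& (p >>> e) := by
  subst he
  apply Nat.eq_of_testBit_eq
  intro i
  simp only [Nat.testBit_land, Nat.testBit_shiftRight]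
  rw [show 2*d + i = d + (d + i) by ring]
  cases p.testBit i <;> cases p.testBit (d + i) <;> cases p.testBit (d + (d + i)) <;> rfl

lemma dirA8 (t : Nat) (w : Int) (P : Nat → Prop)
    (hw : ∀ (jn : Nat) (j : Int), j = (jn : Int) → ((Int.land (w >>> j) 1 ≠ 1) ↔ P jn))
    (ht : t < 2 ^ 48) :
    ((if (t:Int) ≠ 0 then
        ((List.range (pyFormatSp049b (t:Int)).length).filterMap fun i =>
          if (pyFormatSp049b (t:Int)).getD i ' ' = '1' then
            some (((pyFormatSp049b (t:Int)).length : Int) - i - 1) else none).any fun f =>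
          (decide (Int.land (w >>> (f + 24)) 1 ≠ 1) && decide (f + 24 < 49))
          || (decide (f ≥ 8) && decide (Int.land (w >>> (f - 8)) 1 ≠ 1))
      else false) = true) ↔ (AfterP t P 24 ∨ BeforeP t P 8) := by
  by_cases h0 : (t:Int) = 0
  · have ht0 : t = 0 := by exact_mod_cast h0
    subst ht0
    rw [if_neg (by simpa using h0)]
    simp [AfterP, BeforeP, Nat.zero_testBit]
  · rw [if_pos h0, foo_any t ht _ _]
    have key : ∀ k : Nat, k < 48 → Iff
        (((decide (Int.land (w >>> ((((pyFormatSp049b (t:Int)).length : Int) - ((48 - k : Nat) : Int) - 1) + 24)) 1 ≠ 1) &&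
            decide ((((pyFormatSp049b (t:Int)).length : Int) - ((48 - k : Nat) : Int) - 1) + 24 < 49))
          || (decide ((((pyFormatSp049b (t:Int)).length : Int) - ((48 - k : Nat) : Int) - 1) ≥ 8) &&
            decide (Int.land (w >>> ((((pyFormatSp049b (t:Int)).length : Int) - ((48 - k : Nat) : Int) - 1) - 8)) 1 ≠ 1))) = true)
        ((k + 24 < 49 ∧ P (k + 24)) ∨ (8 ≤ k ∧ P (k - 8))) := by
      intro k hk
      have hv : ((pyFormatSp049b (t:Int)).length : Int) - ((48 - k : Nat) : Int) - 1 = ((k + 0 : Nat) : Int) := by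
        rw [fmt_length t ht]; omega
      rw [hv]
      rw [Bool.or_eq_true, Bool.and_eq_true, Bool.and_eq_true,
        decide_eq_true_iff, decide_eq_true_iff, decide_eq_true_iff, decide_eq_true_iff]
      constructor
      · rintro (⟨hne, hlt⟩ | ⟨hge, hne⟩)
        · exact Or.inl ⟨by omega, (hw (k + 24) _ (by omega)).1 hne⟩
        · have hge' : 8 ≤ k := by omega
          exact Or.inr ⟨hge', (hw (k - 8) _ (by omega)).1 hne⟩
      · rintro (⟨hlt, hbit⟩ | ⟨hge, hbit⟩)
        · exact Or.inl ⟨(hw (k + 24) _ (by omega)).2 hbit, by omega⟩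
        · exact Or.inr ⟨by omega, (hw (k - 8) _ (by omega)).2 hbit⟩
    constructor
    · rintro ⟨k, hk, hT, hq⟩
      rcases (key k hk).1 hq with h | h
      · exact Or.inl ⟨k, hT, h.1, h.2⟩
      · exact Or.inr ⟨k, h.1, hT, h.2⟩
    · rintro (⟨k, hT, hlt, hbit⟩ | ⟨k, hd, hT, hbit⟩)
      · exact ⟨k, testBit_lt_48 t k ht hT, hT, (key k (testBit_lt_48 t k ht hT)).2 (Or.inl ⟨hlt, hbit⟩)⟩
      · exact ⟨k, testBit_lt_48 t k ht hT, hT, (key k (testBit_lt_48 t k ht hT)).2 (Or.inr ⟨hd, hbit⟩)⟩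

lemma dirA6 (t : Nat) (w : Int) (P : Nat → Prop)
    (hw : ∀ (jn : Nat) (j : Int), j = (jn : Int) → ((Int.land (w >>> j) 1 ≠ 1) ↔ P jn))
    (ht : t < 2 ^ 48) :
    ((if (t:Int) ≠ 0 then
        ((List.range (pyFormatSp049b (t:Int)).length).filterMap fun i =>
          if (pyFormatSp049b (t:Int)).getD i ' ' = '1' then
            some (((pyFormatSp049b (t:Int)).length : Int) - i - 1 + 6) else none).any fun f =>
          (decide (Int.land (w >>> (f + 12)) 1 ≠ 1) && decide (f + 12 < 49))
          || (decide (f ≥ 12) && decide (Int.land (w >>> (f - 12)) 1 ≠ 1))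
      else false) = true) ↔ (AfterP t P 18 ∨ BeforeP t P 6) := by
  by_cases h0 : (t:Int) = 0
  · have ht0 : t = 0 := by exact_mod_cast h0
    subst ht0
    rw [if_neg (by simpa using h0)]
    simp [AfterP, BeforeP, Nat.zero_testBit]
  · rw [if_pos h0, foo_any t ht _ _]
    have key : ∀ k : Nat, k < 48 → Iff
        (((decide (Int.land (w >>> ((((pyFormatSp049b (t:Int)).length : Int) - ((48 - k : Nat) : Int) - 1 + 6) + 12)) 1 ≠ 1) &&
            decide ((((pyFormatSp049b (t:Int)).length : Int) - ((48 - k : Nat) : Int) - 1 + 6) + 12 < 49))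
          || (decide ((((pyFormatSp049b (t:Int)).length : Int) - ((48 - k : Nat) : Int) - 1 + 6) ≥ 12) &&
            decide (Int.land (w >>> ((((pyFormatSp049b (t:Int)).length : Int) - ((48 - k : Nat) : Int) - 1 + 6) - 12)) 1 ≠ 1))) = true)
        ((k + 18 < 49 ∧ P (k + 18)) ∨ (6 ≤ k ∧ P (k - 6))) := by
      intro k hk
      have hv : ((pyFormatSp049b (t:Int)).length : Int) - ((48 - k : Nat) : Int) - 1 + 6 = ((k + 6 : Nat) : Int) := by
        rw [fmt_length t ht]; omega
      rw [hv]
      rw [Bool.or_eq_true, Bool.and_eq_true, Bool.and_eq_true,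
        decide_eq_true_iff, decide_eq_true_iff, decide_eq_true_iff, decide_eq_true_iff]
      constructor
      · rintro (⟨hne, hlt⟩ | ⟨hge, hne⟩)
        · exact Or.inl ⟨by omega, (hw (k + 18) _ (by omega)).1 hne⟩
        · have hge' : 6 ≤ k := by omega
          exact Or.inr ⟨hge', (hw (k - 6) _ (by omega)).1 hne⟩
      · rintro (⟨hlt, hbit⟩ | ⟨hge, hbit⟩)
        · exact Or.inl ⟨(hw (k + 18) _ (by omega)).2 hbit, by omega⟩
        · exact Or.inr ⟨by omega, (hw (k - 6) _ (by omega)).2 hbit⟩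
    constructor
    · rintro ⟨k, hk, hT, hq⟩
      rcases (key k hk).1 hq with h | h
      · exact Or.inl ⟨k, hT, h.1, h.2⟩
      · exact Or.inr ⟨k, h.1, hT, h.2⟩
    · rintro (⟨k, hT, hlt, hbit⟩ | ⟨k, hd, hT, hbit⟩)
      · exact ⟨k, testBit_lt_48 t k ht hT, hT, (key k (testBit_lt_48 t k ht hT)).2 (Or.inl ⟨hlt, hbit⟩)⟩
      · exact ⟨k, testBit_lt_48 t k ht hT, hT, (key k (testBit_lt_48 t k ht hT)).2 (Or.inr ⟨hd, hbit⟩)⟩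

lemma dirA7 (t : Nat) (w : Int) (P : Nat → Prop)
    (hw : ∀ (jn : Nat) (j : Int), j = (jn : Int) → ((Int.land (w >>> j) 1 ≠ 1) ↔ P jn))
    (ht : t < 2 ^ 48) :
    ((if (t:Int) ≠ 0 then
        ((List.range (pyFormatSp049b (t:Int)).length).filterMap fun i =>
          if (pyFormatSp049b (t:Int)).getD i ' ' = '1' then
            some (((pyFormatSp049b (t:Int)).length : Int) - i - 1 + 7) else none).any fun f =>
          (decide (Int.land (w >>> (f + 14)) 1 ≠ 1) && decide (f + 14 < 49))
          || (decide (f ≥ 14) && decide (Int.land (w >>> (f - 14)) 1 ≠ 1))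
      else false) = true) ↔ (AfterP t P 21 ∨ BeforeP t P 7) := by
  by_cases h0 : (t:Int) = 0
  · have ht0 : t = 0 := by exact_mod_cast h0
    subst ht0
    rw [if_neg (by simpa using h0)]
    simp [AfterP, BeforeP, Nat.zero_testBit]
  · rw [if_pos h0, foo_any t ht _ _]
    have key : ∀ k : Nat, k < 48 → Iff
        (((decide (Int.land (w >>> ((((pyFormatSp049b (t:Int)).length : Int) - ((48 - k : Nat) : Int) - 1 + 7) + 14)) 1 ≠ 1) &&
            decide ((((pyFormatSp049b (t:Int)).length : Int) - ((48 - k : Nat) : Int) - 1 + 7) + 14 < 49))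
          || (decide ((((pyFormatSp049b (t:Int)).length : Int) - ((48 - k : Nat) : Int) - 1 + 7) ≥ 14) &&
            decide (Int.land (w >>> ((((pyFormatSp049b (t:Int)).length : Int) - ((48 - k : Nat) : Int) - 1 + 7) - 14)) 1 ≠ 1))) = true)
        ((k + 21 < 49 ∧ P (k + 21)) ∨ (7 ≤ k ∧ P (k - 7))) := by
      intro k hk
      have hv : ((pyFormatSp049b (t:Int)).length : Int) - ((48 - k : Nat) : Int) - 1 + 7 = ((k + 7 : Nat) : Int) := by
        rw [fmt_length t ht]; omega
      rw [hv]
      rw [Bool.or_eq_true, Bool.and_eq_true, Bool.and_eq_true,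
        decide_eq_true_iff, decide_eq_true_iff, decide_eq_true_iff, decide_eq_true_iff]
      constructor
      · rintro (⟨hne, hlt⟩ | ⟨hge, hne⟩)
        · exact Or.inl ⟨by omega, (hw (k + 21) _ (by omega)).1 hne⟩
        · have hge' : 7 ≤ k := by omega
          exact Or.inr ⟨hge', (hw (k - 7) _ (by omega)).1 hne⟩
      · rintro (⟨hlt, hbit⟩ | ⟨hge, hbit⟩)
        · exact Or.inl ⟨(hw (k + 21) _ (by omega)).2 hbit, by omega⟩
        · exact Or.inr ⟨by omega, (hw (k - 7) _ (by omega)).2 hbit⟩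
    constructor
    · rintro ⟨k, hk, hT, hq⟩
      rcases (key k hk).1 hq with h | h
      · exact Or.inl ⟨k, hT, h.1, h.2⟩
      · exact Or.inr ⟨k, h.1, hT, h.2⟩
    · rintro (⟨k, hT, hlt, hbit⟩ | ⟨k, hd, hT, hbit⟩)
      · exact ⟨k, testBit_lt_48 t k ht hT, hT, (key k (testBit_lt_48 t k ht hT)).2 (Or.inl ⟨hlt, hbit⟩)⟩
      · exact ⟨k, testBit_lt_48 t k ht hT, hT, (key k (testBit_lt_48 t k ht hT)).2 (Or.inr ⟨hd, hbit⟩)⟩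

lemma dirAv (t : Nat) (w : Int) (P : Nat → Prop)
    (hw : ∀ (jn : Nat) (j : Int), j = (jn : Int) → ((Int.land (w >>> j) 1 ≠ 1) ↔ P jn))
    (ht : t < 2 ^ 48) :
    ((if (t:Int) ≠ 0 then
        ((List.range (pyFormatSp049b (t:Int)).length).filterMap fun i =>
          if (pyFormatSp049b (t:Int)).getD i ' ' = '1' then
            some (((pyFormatSp049b (t:Int)).length : Int) - i) else none).any fun f =>
          decide (f ≥ 2) && decide (Int.land (w >>> (f - 2)) 1 ≠ 1)
      else false) = true) ↔ BeforeP t P 1 := by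
  by_cases h0 : (t:Int) = 0
  · have ht0 : t = 0 := by exact_mod_cast h0
    subst ht0
    rw [if_neg (by simpa using h0)]
    simp [BeforeP, Nat.zero_testBit]
  · rw [if_pos h0, foo_any t ht _ _]
    have key : ∀ k : Nat, k < 48 → Iff
        ((decide ((((pyFormatSp049b (t:Int)).length : Int) - ((48 - k : Nat) : Int)) ≥ 2) &&
            decide (Int.land (w >>> ((((pyFormatSp049b (t:Int)).length : Int) - ((48 - k : Nat) : Int)) - 2)) 1 ≠ 1)) = true)
        (1 ≤ k ∧ P (k - 1)) := by
      intro k hk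
      have hv : ((pyFormatSp049b (t:Int)).length : Int) - ((48 - k : Nat) : Int) = ((k + 1 : Nat) : Int) := by
        rw [fmt_length t ht]; omega
      rw [hv]
      rw [Bool.and_eq_true, decide_eq_true_iff, decide_eq_true_iff]
      constructor
      · rintro ⟨hge, hne⟩
        have hge' : 1 ≤ k := by omega
        exact ⟨hge', (hw (k - 1) _ (by omega)).1 hne⟩
      · rintro ⟨hge, hbit⟩
        exact ⟨by omega, (hw (k - 1) _ (by omega)).2 hbit⟩
    constructor
    · rintro ⟨k, hk, hT, hq⟩
      obtain ⟨h1, h2⟩ := (key k hk).1 hq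
      exact ⟨k, h1, hT, h2⟩
    · rintro ⟨k, hd, hT, hbit⟩
      exact ⟨k, testBit_lt_48 t k ht hT, hT, (key k (testBit_lt_48 t k ht hT)).2 ⟨hd, hbit⟩⟩

lemma if_bool (a b : Bool) : (if a = true then true else b) = (a || b) := by
  cases a <;> simp

lemma orAssoc4 (a b c d : Prop) : (a ∨ (b ∨ (c ∨ d))) ↔ ((a ∨ (b ∨ c)) ∨ d) := by tauto

lemma A_iff (p : Nat) (msk w : Int) (P : Nat → Prop) (hp48 : p < 2 ^ 48)
    (hopp : Int.xor msk ((p:Nat):Int) = w)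
    (hw : ∀ (jn : Nat) (j : Int), j = (jn : Int) → ((Int.land (w >>> j) 1 ≠ 1) ↔ P jn)) :
    (connected_three (p:Int) msk = true) ↔
      ((AfterP ((p &&& (p >>> 8)) &&& ((p &&& (p >>> 8)) >>> 8)) P 24
          ∨ BeforeP ((p &&& (p >>> 8)) &&& ((p &&& (p >>> 8)) >>> 8)) P 8)
        ∨ ((AfterP ((p &&& (p >>> 6)) &&& ((p &&& (p >>> 6)) >>> 6)) P 18
          ∨ BeforeP ((p &&& (p >>> 6)) &&& ((p &&& (p >>> 6)) >>> 6)) P 6)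
        ∨ ((AfterP ((p &&& (p >>> 7)) &&& ((p &&& (p >>> 7)) >>> 7)) P 21
          ∨ BeforeP ((p &&& (p >>> 7)) &&& ((p &&& (p >>> 7)) >>> 7)) P 7)
        ∨ BeforeP ((p &&& (p >>> 1)) &&& ((p &&& (p >>> 1)) >>> 1)) P 1))) := by
  have hb : ∀ d : Nat, (p &&& (p >>> d)) &&& ((p &&& (p >>> d)) >>> d) ≤ p :=
    fun d => le_trans Nat.and_le_left Nat.and_le_left
  unfold connected_three
  simp only [hopp, sr1, sr6, sr7, sr8, cast_land]
  simp only [if_bool, Bool.or_eq_true]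
  exact or_congr (dirA8 _ w P hw (lt_of_le_of_lt (hb 8) hp48))
    (or_congr (dirA6 _ w P hw (lt_of_le_of_lt (hb 6) hp48))
      (or_congr (dirA7 _ w P hw (lt_of_le_of_lt (hb 7) hp48))
        (dirAv _ w P hw (lt_of_le_of_lt (hb 1) hp48))))

lemma B_iff_pos (p mm : Nat) (hp48 : p < 2 ^ 48) (ho : mm ^^^ p < 2 ^ 49) :
    (connected_three_alt (p:Int) (mm:Int) = true) ↔
      (((AfterP ((p &&& (p >>> 8)) &&& (p >>> 16)) (fun j => (mm ^^^ p).testBit j = false) 24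
          ∨ BeforeP ((p &&& (p >>> 8)) &&& (p >>> 16)) (fun j => (mm ^^^ p).testBit j = false) 8)
        ∨ ((AfterP ((p &&& (p >>> 6)) &&& (p >>> 12)) (fun j => (mm ^^^ p).testBit j = false) 18
          ∨ BeforeP ((p &&& (p >>> 6)) &&& (p >>> 12)) (fun j => (mm ^^^ p).testBit j = false) 6)
        ∨ (AfterP ((p &&& (p >>> 7)) &&& (p >>> 14)) (fun j => (mm ^^^ p).testBit j = false) 21
          ∨ BeforeP ((p &&& (p >>> 7)) &&& (p >>> 14)) (fun j => (mm ^^^ p).testBit j = false) 7)))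
      ∨ BeforeP ((p &&& (p >>> 1)) &&& (p >>> 2)) (fun j => (mm ^^^ p).testBit j = false) 1) := by
  have hle : ∀ d : Nat, (p &&& (p >>> d)) &&& (p >>> (2*d)) < 2 ^ 48 :=
    fun d => lt_of_le_of_lt (le_trans Nat.and_le_left Nat.and_le_left) hp48
  unfold connected_three_alt
  simp only [List.any_cons, List.any_nil, full_eq,
    show ((2:Int) * 8) = 16 by norm_num, show ((2:Int) * 6) = 12 by norm_num,
    show ((2:Int) * 7) = 14 by norm_num, show ((3:Int) * 8) = 24 by norm_num,
    show ((3:Int) * 6) = 18 by norm_num, show ((3:Int) * 7) = 21 by norm_num,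
    cast_xor, sr1, sr2, sr6, sr7, sr8, sr12, sr14, sr16, cast_land, sl18, sl21, sl24]
  simp only [Bool.or_eq_true, Bool.false_eq_true, or_false]
  refine or_congr (or_congr ?_ (or_congr ?_ ?_)) ?_
  · refine or_congr ?_ ?_
    · rw [decide_eq_true_iff]
      exact Int.natCast_ne_zero.trans (after_iff _ _ 24)
    · rw [decide_eq_true_iff]
      exact Int.natCast_ne_zero.trans (before_iff _ _ 8 (by simpa using hle 8) ho)
  · refine or_congr ?_ ?_
    · rw [decide_eq_true_iff]
      exact Int.natCast_ne_zero.trans (after_iff _ _ 18)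
    · rw [decide_eq_true_iff]
      exact Int.natCast_ne_zero.trans (before_iff _ _ 6 (by simpa using hle 6) ho)
  · refine or_congr ?_ ?_
    · rw [decide_eq_true_iff]
      exact Int.natCast_ne_zero.trans (after_iff _ _ 21)
    · rw [decide_eq_true_iff]
      exact Int.natCast_ne_zero.trans (before_iff _ _ 7 (by simpa using hle 7) ho)
  · rw [decide_eq_true_iff]
    exact Int.natCast_ne_zero.trans (before_iff _ _ 1 (by simpa using hle 1) ho)

lemma B_iff_neg (p n : Nat) (hp48 : p < 2 ^ 48) :
    (connected_three_alt (p:Int) (Int.negSucc n) = true) ↔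
      (((AfterP ((p &&& (p >>> 8)) &&& (p >>> 16)) (fun j => (n ^^^ p).testBit j = true) 24
          ∨ BeforeP ((p &&& (p >>> 8)) &&& (p >>> 16)) (fun j => (n ^^^ p).testBit j = true) 8)
        ∨ ((AfterP ((p &&& (p >>> 6)) &&& (p >>> 12)) (fun j => (n ^^^ p).testBit j = true) 18
          ∨ BeforeP ((p &&& (p >>> 6)) &&& (p >>> 12)) (fun j => (n ^^^ p).testBit j = true) 6)
        ∨ (AfterP ((p &&& (p >>> 7)) &&& (p >>> 14)) (fun j => (n ^^^ p).testBit j = true) 21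
          ∨ BeforeP ((p &&& (p >>> 7)) &&& (p >>> 14)) (fun j => (n ^^^ p).testBit j = true) 7)))
      ∨ BeforeP ((p &&& (p >>> 1)) &&& (p >>> 2)) (fun j => (n ^^^ p).testBit j = true) 1) := by
  have hle : ∀ d : Nat, (p &&& (p >>> d)) &&& (p >>> (2*d)) < 2 ^ 48 :=
    fun d => lt_of_le_of_lt (le_trans Nat.and_le_left Nat.and_le_left) hp48
  unfold connected_three_alt
  simp only [List.any_cons, List.any_nil, full_eq,
    show ((2:Int) * 8) = 16 by norm_num, show ((2:Int) * 6) = 12 by norm_num,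
    show ((2:Int) * 7) = 14 by norm_num, show ((3:Int) * 8) = 24 by norm_num,
    show ((3:Int) * 6) = 18 by norm_num, show ((3:Int) * 7) = 21 by norm_num,
    cast_xor_negL, cast_xor_negR, sr1, sr2, sr6, sr7, sr8, sr12, sr14, sr16,
    cast_land, cast_land_negSucc, sl18, sl21, sl24]
  simp only [Bool.or_eq_true, Bool.false_eq_true, or_false]
  refine or_congr (or_congr ?_ (or_congr ?_ ?_)) ?_
  · refine or_congr ?_ ?_
    · rw [decide_eq_true_iff]
      exact Int.natCast_ne_zero.trans (after_iff_neg _ _ 24)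
    · rw [decide_eq_true_iff]
      exact Int.natCast_ne_zero.trans (before_iff_neg _ _ 8 (by simpa using hle 8))
  · refine or_congr ?_ ?_
    · rw [decide_eq_true_iff]
      exact Int.natCast_ne_zero.trans (after_iff_neg _ _ 18)
    · rw [decide_eq_true_iff]
      exact Int.natCast_ne_zero.trans (before_iff_neg _ _ 6 (by simpa using hle 6))
  · refine or_congr ?_ ?_
    · rw [decide_eq_true_iff]
      exact Int.natCast_ne_zero.trans (after_iff_neg _ _ 21)
    · rw [decide_eq_true_iff]
      exact Int.natCast_ne_zero.trans (before_iff_neg _ _ 7 (by simpa using hle 7))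
  · rw [decide_eq_true_iff]
    exact Int.natCast_ne_zero.trans (before_iff_neg _ _ 1 (by simpa using hle 1))

-- ===== VERDICT (by name: the statement is the Claim_ definition above) =====
set_option maxRecDepth 10000 in
theorem connected_three_spec : Claim_equal_connected_three := by
  intro position mask hdom hpre
  unfold Spec_connected_three
  unfold Pre_connected_three at hpre
  lift position to ℕ using hpre with p
  unfold Dom_connected_three pvDomInt at hdom
  rw [Bool.and_eq_true, decide_eq_true_iff, decide_eq_true_iff] at hdom
  have hpb : p ≤ 2147483648 := by exact_mod_cast hdom.1.2
  have hp48 : p < 2 ^ 48 := lt_of_le_of_lt hpb (by norm_num)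
  rw [Bool.eq_iff_iff]
  cases mask with
  | ofNat mm =>
    have hmb : mm ≤ 2147483648 := by
      have h2 := hdom.2.2
      rw [Int.ofNat_eq_natCast] at h2
      exact_mod_cast h2
    have ho : mm ^^^ p < 2 ^ 49 := Nat.xor_lt_two_pow (by omega) (by omega)
    rw [show (Int.ofNat mm) = ((mm:Nat):Int) from rfl]
    rw [A_iff p ((mm:Nat):Int) (((mm ^^^ p : Nat)):Int) (fun j => (mm ^^^ p).testBit j = false)
        hp48 (cast_xor mm p) (fun jn j hj => intBitTest (mm ^^^ p) jn j hj),
      B_iff_pos p mm hp48 ho,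
      tri_eq p 8 16 (by norm_num), tri_eq p 6 12 (by norm_num),
      tri_eq p 7 14 (by norm_num), tri_eq p 1 2 (by norm_num)]
    exact orAssoc4 _ _ _ _
  | negSucc n =>
    rw [A_iff p (Int.negSucc n) (Int.negSucc (n ^^^ p)) (fun j => (n ^^^ p).testBit j = true)
        hp48 (cast_xor_negL n p) (fun jn j hj => intBitTestNeg (n ^^^ p) jn j hj),
      B_iff_neg p n hp48,
      tri_eq p 8 16 (by norm_num), tri_eq p 6 12 (by norm_num),
      tri_eq p 7 14 (by norm_num), tri_eq p 1 2 (by norm_num)]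
    exact orAssoc4 _ _ _ _
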